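-- pv_equiv track=rewrite | github.com/belenes/parser | avigliano_lexer_v3.py | a_Menor
-- ===== SOURCE A (Python) =====
-- def a_Menor(src):
--     s = 1
--     for c in src:
--         if s == 1 and c == '<':
--             s = 2
--         else:
--             s = -1
--             break
--     return s == 2
-- ===== SOURCE B (Python) =====
-- def a_Menor(src):
--     return list(src) == ['<']
-- ===== Notes on version B (the rewrite author's own statement) =====
-- stated objective: simpler
-- what changed: Replaces the per-character state machine with break by materializing the sequence and comparing it to ['<'] in one step.
import Mathlib
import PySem

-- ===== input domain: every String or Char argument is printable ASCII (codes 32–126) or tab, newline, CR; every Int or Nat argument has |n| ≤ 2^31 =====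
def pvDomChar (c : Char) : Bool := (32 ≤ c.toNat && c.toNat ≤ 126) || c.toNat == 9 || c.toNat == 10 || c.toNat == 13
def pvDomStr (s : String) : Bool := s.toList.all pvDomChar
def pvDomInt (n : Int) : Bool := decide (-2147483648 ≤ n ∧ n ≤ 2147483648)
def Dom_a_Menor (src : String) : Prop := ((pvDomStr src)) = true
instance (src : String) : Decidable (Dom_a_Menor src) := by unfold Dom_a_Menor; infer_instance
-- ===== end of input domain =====

-- B replaces A's per-character state machine (with break) by materializing the character list and comparing it to ['<'] — objective: simpler.


-- ===== PORT A =====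
-- loop with state s and break: returns -1 and stops on first non-matching char
def aMenorLoop (s : Int) (cs : List Char) : Int :=
  match cs with
  | [] => s
  | c :: rest => if s == 1 && c == '<' then aMenorLoop 2 rest else -1

def a_Menor (src : String) : Bool := aMenorLoop 1 src.toList == 2

-- ===== PORT B =====
-- B: materialize the sequence and compare to ['<']
def a_Menor_alt (src : String) : Bool := src.toList == ['<']

-- ===== PRECONDITION & SPEC =====
def Spec_a_Menor (src : String) (out : Bool) : Prop := out = a_Menor_alt src
instance (src : String) (out : Bool) : Decidable (Spec_a_Menor src out) := by unfold Spec_a_Menor; infer_instance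

-- ===== CLAIM (what is proved, stated in full; the proofs are below) =====
def Claim_equal_a_Menor : Prop := ∀ (src : String), Dom_a_Menor src → Spec_a_Menor src (a_Menor src)

-- ===== LEMMAS AND PROOFS =====

-- ===== VERDICT (by name: the statement is the Claim_ definition above) =====
theorem a_Menor_spec : Claim_equal_a_Menor := by
  intro src _
  unfold Spec_a_Menor a_Menor a_Menor_alt
  cases h : src.toList with
  | nil => simp [aMenorLoop]
  | cons c rest =>
    cases rest with
    | nil => by_cases hc : c = '<' <;> simp [aMenorLoop, hc]
    | cons d rest2 => by_cases hc : c = '<' <;> by_cases hd : d = '<' <;> simp [aMenorLoop, hc, hd]
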